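-- pv_equiv track=rewrite | github.com/NeuralBlitz/fishstick | fishstick/ner/sequence_labeling.py | tags_to_spans
-- ===== SOURCE A (Python) =====
-- from typing import List, Tuple, Optional, Dict, Any, Set
--
-- def tags_to_spans(
--
--     text: List[str],
--     tags: List[str],
-- ) -> List[Tuple[int, int, str]]:
--     spans: List[Tuple[int, int, str]] = []
--
--     i = 0
--     while i < len(tags):
--         tag = tags[i]
--
--         if tag == "O":
--             i += 1
--         elif tag.startswith("U-"):
--             entity_type = tag[2:]
--             spans.append((i, i, entity_type))
--             i += 1
--         elif tag.startswith("B-"):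
--             entity_type = tag[2:]
--             start = i
--             i += 1
--
--             while i < len(tags) and tags[i] == f"I-{entity_type}":
--                 i += 1
--
--             if i < len(tags) and tags[i] == f"L-{entity_type}":
--                 spans.append((start, i, entity_type))
--                 i += 1
--             else:
--                 spans.append((start, i - 1, entity_type))
--         elif tag.startswith("I-"):
--             entity_type = tag[2:]
--             start = i
--             while i < len(tags) and tags[i] == f"I-{entity_type}":
--                 i += 1
--             spans.append((start, i - 1, entity_type))
--         else:
--             i += 1
--
--     return spans
-- ===== SOURCE B (Python) =====
-- def tags_to_spans(text, tags):
--     spans = []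
--     open_ = None  # (start, entity_type, opened_by_b)
--     for i, tag in enumerate(tags):
--         if open_ is not None:
--             start, ty, by_b = open_
--             if tag == f"I-{ty}":
--                 continue
--             if by_b and tag == f"L-{ty}":
--                 spans.append((start, i, ty))
--                 open_ = None
--                 continue
--             spans.append((start, i - 1, ty))
--             open_ = None
--         # current tag starts something new (or nothing)
--         if tag.startswith("U-"):
--             spans.append((i, i, tag[2:]))
--         elif tag.startswith("B-"):
--             open_ = (i, tag[2:], True)
--         elif tag.startswith("I-"):
--             open_ = (i, tag[2:], False)
--         # "O", lone "L-...", anything else: no entity starts here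
--     if open_ is not None:
--         start, ty, _ = open_
--         spans.append((start, len(tags) - 1, ty))
--     return spans
-- ===== Notes on version B (the rewrite author's own statement) =====
-- stated objective: simpler
-- what changed: Replaced A's outer while-loop with nested inner while-scans and manual index arithmetic by a single flat for-loop over enumerate(tags) maintaining an explicit open-entity state (start, type, opened-by-B), closing and reprocessing on the terminating tag.
import Mathlib
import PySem

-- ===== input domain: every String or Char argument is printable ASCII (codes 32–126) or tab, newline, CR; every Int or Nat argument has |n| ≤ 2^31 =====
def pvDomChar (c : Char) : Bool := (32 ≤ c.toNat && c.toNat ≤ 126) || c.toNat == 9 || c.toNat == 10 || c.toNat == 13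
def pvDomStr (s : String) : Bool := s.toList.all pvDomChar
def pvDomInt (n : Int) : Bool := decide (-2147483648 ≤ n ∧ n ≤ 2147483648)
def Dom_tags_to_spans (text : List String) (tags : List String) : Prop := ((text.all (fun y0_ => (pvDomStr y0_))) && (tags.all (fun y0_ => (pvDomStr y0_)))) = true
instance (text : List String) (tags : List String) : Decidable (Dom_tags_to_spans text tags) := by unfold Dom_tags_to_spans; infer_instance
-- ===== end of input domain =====

-- B replaces A's nested while-scans by one flat enumerate loop with explicit open-entity state (objective: simpler).

-- ===== PORT A =====
-- inner while of A's B-/I- branches: `while i < len(tags) and tags[i] == f"I-{entity_type}": i += 1`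
def pvSkipI (tags : List String) (ty : String) (i : Nat) : Nat :=
  if h : i < tags.length then
    if tags[i] = "I-" ++ ty then pvSkipI tags ty (i + 1) else i
  else i
termination_by tags.length - i

-- cited by pvLoopA's decreasing_by
theorem pvSkipI_ge (tags : List String) (ty : String) (i : Nat) : i ≤ pvSkipI tags ty i := by
  fun_induction pvSkipI <;> omega

-- cited by pvLoopA's decreasing_by: a tag starting with a 2-char prefix is that prefix ++ tag[2:]
theorem pv_sw2 (tag p : String) (hp : p.toList.length = 2)
    (h : PySem.Str.startswith tag p = true) :
    tag = p ++ PySem.Str.slice tag (some 2) none := by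
  have h' : p.toList <+: tag.toList := by
    rw [PySem.Str.startswith_eq] at h
    exact (PySem.Chars.startswith_iff _ _).mp h
  obtain ⟨t, ht⟩ := h'
  have hslice : (PySem.Str.slice tag (some 2) none).toList = tag.toList.drop 2 := by
    rw [PySem.Str.toList_slice, PySem.Chars.slice_eq_listSlice]
    rw [PySem.List.slice_from]
    · rfl
    · norm_num
  have hdata : tag.toList = p.toList ++ (PySem.Str.slice tag (some 2) none).toList := by
    rw [hslice, ← ht, List.drop_append_of_le_length (by omega)]
    simp [hp]
  have : tag.toList = (p ++ PySem.Str.slice tag (some 2) none).toList := by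
    simpa using hdata
  exact String.toList_inj.mp this

-- A's outer while loop, step for step
def pvLoopA (tags : List String) (i : Nat) (spans : List (Int × Int × String)) :
    List (Int × Int × String) :=
  if h : i < tags.length then
    let tag := tags[i]
    if tag = "O" then pvLoopA tags (i + 1) spans
    else if PySem.Str.startswith tag "U-" then
      pvLoopA tags (i + 1) (spans ++ [((i : Int), (i : Int), PySem.Str.slice tag (some 2) none)])
    else if PySem.Str.startswith tag "B-" then
      let ty := PySem.Str.slice tag (some 2) none
      let j := pvSkipI tags ty (i + 1)
      if j < tags.length ∧ tags.getD j "" = "L-" ++ ty then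
        pvLoopA tags (j + 1) (spans ++ [((i : Int), (j : Int), ty)])
      else
        pvLoopA tags j (spans ++ [((i : Int), (j : Int) - 1, ty)])
    else if PySem.Str.startswith tag "I-" then
      let ty := PySem.Str.slice tag (some 2) none
      let j := pvSkipI tags ty i
      pvLoopA tags j (spans ++ [((i : Int), (j : Int) - 1, ty)])
    else pvLoopA tags (i + 1) spans
  else spans
termination_by tags.length - i
decreasing_by
  · omega
  · omega
  · have := pvSkipI_ge tags (PySem.Str.slice tags[i] (some 2) none) (i + 1); omega
  · have := pvSkipI_ge tags (PySem.Str.slice tags[i] (some 2) none) (i + 1); omega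
  · rename_i _ _ _ h4
    have heq : tags[i] = "I-" ++ PySem.Str.slice tags[i] (some 2) none :=
      pv_sw2 _ "I-" (by decide) h4
    have hstep : pvSkipI tags (PySem.Str.slice tags[i] (some 2) none) i
        = pvSkipI tags (PySem.Str.slice tags[i] (some 2) none) (i + 1) := by
      rw [pvSkipI]; simp [h, ← heq]
    have := pvSkipI_ge tags (PySem.Str.slice tags[i] (some 2) none) (i + 1)
    omega
  · omega

def tags_to_spans (text : List String) (tags : List String) : List (Int × Int × String) :=
  pvLoopA tags 0 []

-- ===== PORT B =====
-- handling of the current tag when no entity is open (the tail of B's loop body)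
def pvFresh (spans : List (Int × Int × String)) (i : Int) (tag : String) :
    List (Int × Int × String) × Option (Int × String × Bool) :=
  if PySem.Str.startswith tag "U-" then
    (spans ++ [(i, i, PySem.Str.slice tag (some 2) none)], none)
  else if PySem.Str.startswith tag "B-" then
    (spans, some (i, PySem.Str.slice tag (some 2) none, true))
  else if PySem.Str.startswith tag "I-" then
    (spans, some (i, PySem.Str.slice tag (some 2) none, false))
  else (spans, none)

-- one iteration of B's flat loop
def pvStep (st : List (Int × Int × String) × Option (Int × String × Bool)) (it : Int × String) :
    List (Int × Int × String) × Option (Int × String × Bool) :=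
  match st.2 with
  | some (start, ty, byb) =>
    if it.2 = "I-" ++ ty then st
    else if byb = true ∧ it.2 = "L-" ++ ty then (st.1 ++ [(start, it.1, ty)], none)
    else pvFresh (st.1 ++ [(start, it.1 - 1, ty)]) it.1 it.2
  | none => pvFresh st.1 it.1 it.2

def tags_to_spans_alt (text : List String) (tags : List String) : List (Int × Int × String) :=
  let st := (PySem.List.enumerate tags 0).foldl pvStep ([], none)
  match st.2 with
  | some (start, ty, _) => st.1 ++ [(start, (tags.length : Int) - 1, ty)]
  | none => st.1

-- ===== PRECONDITION & SPEC =====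
def Spec_tags_to_spans (text : List String) (tags : List String) (out : List (Int × Int × String)) : Prop := out = tags_to_spans_alt text tags
instance (text : List String) (tags : List String) (out : List (Int × Int × String)) : Decidable (Spec_tags_to_spans text tags out) := by unfold Spec_tags_to_spans; infer_instance

-- ===== CLAIM (what is proved, stated in full; the proofs are below) =====
def Claim_equal_tags_to_spans : Prop := ∀ (text : List String) (tags : List String), Dom_tags_to_spans text tags → Spec_tags_to_spans text tags (tags_to_spans text tags)

-- ===== LEMMAS AND PROOFS =====

-- B's post-loop finalisation
def pvFinal (tags : List String) (st : List (Int × Int × String) × Option (Int × String × Bool)) :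
    List (Int × Int × String) :=
  match st.2 with
  | some (start, ty, _) => st.1 ++ [(start, (tags.length : Int) - 1, ty)]
  | none => st.1

-- what A computes from position i given B's open-entity state
def pvAcont (tags : List String) (op : Option (Int × String × Bool)) (i : Nat)
    (spans : List (Int × Int × String)) : List (Int × Int × String) :=
  match op with
  | none => pvLoopA tags i spans
  | some (start, ty, true) =>
      let j := pvSkipI tags ty i
      if j < tags.length ∧ tags.getD j "" = "L-" ++ ty then
        pvLoopA tags (j + 1) (spans ++ [(start, (j : Int), ty)])
      else pvLoopA tags j (spans ++ [(start, (j : Int) - 1, ty)])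
  | some (start, ty, false) =>
      let j := pvSkipI tags ty i
      pvLoopA tags j (spans ++ [(start, (j : Int) - 1, ty)])

theorem pv_unfoldA (tags : List String) (i : Nat) (spans : List (Int × Int × String))
    (h : i < tags.length) :
    pvLoopA tags i spans =
      pvAcont tags (pvFresh spans (i : Int) tags[i]).2 (i + 1) (pvFresh spans (i : Int) tags[i]).1 := by
  rw [pvLoopA, dif_pos h]
  by_cases hO : tags[i] = "O"
  · have h1 : PySem.Chars.startswith ['O'] ['U', '-'] = false := by decide
    have h2 : PySem.Chars.startswith ['O'] ['B', '-'] = false := by decide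
    have h3 : PySem.Chars.startswith ['O'] ['I', '-'] = false := by decide
    simp [pvFresh, pvAcont, hO, h1, h2, h3]
  · by_cases hU : PySem.Chars.startswith tags[i].toList ['U', '-'] = true
    · simp [pvFresh, pvAcont, hO, hU]
    · by_cases hB : PySem.Chars.startswith tags[i].toList ['B', '-'] = true
      · simp [pvFresh, pvAcont, hO, hU, hB]
      · by_cases hI : PySem.Chars.startswith tags[i].toList ['I', '-'] = true
        · have heq : tags[i] = "I-" ++ PySem.Str.slice tags[i] (some 2) none :=
            pv_sw2 _ "I-" (by decide) (by simpa using hI)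
          have hstep : pvSkipI tags (PySem.Str.slice tags[i] (some 2) none) i
              = pvSkipI tags (PySem.Str.slice tags[i] (some 2) none) (i + 1) := by
            rw [pvSkipI]; simp [h, ← heq]
          simp [pvFresh, pvAcont, hO, hU, hB, hI, hstep]
        · simp [pvFresh, pvAcont, hO, hU, hB, hI]

theorem pv_main (tags : List String) (n i : Nat) (spans : List (Int × Int × String))
    (op : Option (Int × String × Bool)) (hle : i ≤ tags.length) (hn : tags.length - i = n) :
    pvFinal tags (List.foldl pvStep (spans, op) (PySem.List.enumerate (tags.drop i) (i : Int))) =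
      pvAcont tags op i spans := by
  induction n using Nat.strong_induction_on generalizing i spans op with
  | _ n IH =>
  rcases Nat.lt_or_ge i tags.length with h | h
  · -- i < tags.length : one loop iteration
    have hdrop : tags.drop i = tags[i] :: tags.drop (i + 1) := List.drop_eq_getElem_cons h
    rw [hdrop, PySem.List.enumerate_cons, List.foldl_cons]
    have hcast : (i : Int) + 1 = ((i + 1 : Nat) : Int) := by push_cast; ring
    rw [hcast]
    match op with
    | none =>
      have hstep : pvStep (spans, none) ((i : Int), tags[i]) = pvFresh spans (i : Int) tags[i] := rfl
      rw [hstep]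
      have hIH := IH (tags.length - (i + 1)) (by omega) (i + 1)
        (pvFresh spans (i : Int) tags[i]).1 (pvFresh spans (i : Int) tags[i]).2
        (by omega) rfl
      rw [Prod.mk.eta] at hIH
      rw [hIH]
      exact (pv_unfoldA tags i spans h).symm
    | some (start, ty, byb) =>
      by_cases hI : tags[i] = "I-" ++ ty
      · have hstep : pvStep (spans, some (start, ty, byb)) ((i : Int), tags[i])
            = (spans, some (start, ty, byb)) := by
          simp [pvStep, hI]
        rw [hstep]
        rw [IH (tags.length - (i + 1)) (by omega) (i + 1) spans (some (start, ty, byb)) (by omega) rfl]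
        have hskip : pvSkipI tags ty i = pvSkipI tags ty (i + 1) := by
          rw [pvSkipI]; simp [h, hI]
        cases byb <;> simp [pvAcont, hskip]
      · by_cases hL : byb = true ∧ tags[i] = "L-" ++ ty
        · have hstep : pvStep (spans, some (start, ty, byb)) ((i : Int), tags[i])
              = (spans ++ [(start, (i : Int), ty)], none) := by
            simp [pvStep, hI, hL]
          rw [hstep]
          rw [IH (tags.length - (i + 1)) (by omega) (i + 1) _ none (by omega) rfl]
          have hskip : pvSkipI tags ty i = i := by
            rw [pvSkipI]; simp [h, hI]
          have hgetD : tags[i]?.getD "" = tags[i] := by simp [List.getElem?_eq_getElem h]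
          rw [hL.1]
          simp [pvAcont, hskip, hgetD, hL.2, h]
        · have hstep : pvStep (spans, some (start, ty, byb)) ((i : Int), tags[i])
              = pvFresh (spans ++ [(start, (i : Int) - 1, ty)]) (i : Int) tags[i] := by
            simp [pvStep, hI, hL]
          rw [hstep]
          have hIH := IH (tags.length - (i + 1)) (by omega) (i + 1)
            (pvFresh (spans ++ [(start, (i : Int) - 1, ty)]) (i : Int) tags[i]).1
            (pvFresh (spans ++ [(start, (i : Int) - 1, ty)]) (i : Int) tags[i]).2
            (by omega) rfl
          rw [Prod.mk.eta] at hIH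
          rw [hIH, ← pv_unfoldA tags i (spans ++ [(start, (i : Int) - 1, ty)]) h]
          have hskip : pvSkipI tags ty i = i := by
            rw [pvSkipI]; simp [h, hI]
          cases byb with
          | false => simp [pvAcont, hskip]
          | true =>
            have hgetD : tags[i]?.getD "" = tags[i] := by simp [List.getElem?_eq_getElem h]
            have hne : tags[i] ≠ "L-" ++ ty := fun hc => hL ⟨rfl, hc⟩
            simp [pvAcont, hskip, hgetD, hne]
  · -- i = tags.length : loop over, finalisation
    have hi : i = tags.length := le_antisymm hle h
    subst hi
    rw [List.drop_length, PySem.List.enumerate_nil, List.foldl_nil]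
    match op with
    | none =>
      show spans = pvLoopA tags tags.length spans
      rw [pvLoopA]; simp
    | some (start, ty, byb) =>
      have hskip : pvSkipI tags ty tags.length = tags.length := by
        rw [pvSkipI]; simp
      have hloop : ∀ sp, pvLoopA tags tags.length sp = sp := by
        intro sp; rw [pvLoopA]; simp
      cases byb <;> simp [pvFinal, pvAcont, hskip, hloop]

-- ===== VERDICT (by name: the statement is the Claim_ definition above) =====
theorem tags_to_spans_spec : Claim_equal_tags_to_spans := by
  intro text tags _
  unfold Spec_tags_to_spans tags_to_spans tags_to_spans_alt
  have := pv_main tags tags.length 0 [] none (by omega) (by omega)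
  simpa [pvFinal, pvAcont] using this.symm
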